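-- pv_equiv track=rewrite | github.com/Gabriel-main/Practicas | dos_positivos.py | two_are_positive
-- ===== SOURCE A (Python) =====
-- def two_are_positive(a, b, c):
--     numeros = [a,b,c]
--     dos_true = 0
--
--   #Aqui hace la comparacion si hay numeros positivos
--     for i in range(len(numeros)):
--         if numeros[i] > 0:
--             dos_true += 1
--
--   #Aqui comprueba solo dos numeros positivos sale True, si sale mas de dos o menos sale False
--     if dos_true == 2:
--         return True
--     else:
--         return False
-- ===== SOURCE B (Python) =====
-- def two_are_positive(a, b, c):
--     return (a > 0 and b > 0 and c <= 0) or \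
--            (a > 0 and c > 0 and b <= 0) or \
--            (b > 0 and c > 0 and a <= 0)
-- ===== Notes on version B (the rewrite author's own statement) =====
-- stated objective: simpler
-- what changed: Replaced the list-building counting loop with a single boolean expression enumerating the three mutually exclusive ways exactly two of the three numbers are positive.
import Mathlib
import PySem

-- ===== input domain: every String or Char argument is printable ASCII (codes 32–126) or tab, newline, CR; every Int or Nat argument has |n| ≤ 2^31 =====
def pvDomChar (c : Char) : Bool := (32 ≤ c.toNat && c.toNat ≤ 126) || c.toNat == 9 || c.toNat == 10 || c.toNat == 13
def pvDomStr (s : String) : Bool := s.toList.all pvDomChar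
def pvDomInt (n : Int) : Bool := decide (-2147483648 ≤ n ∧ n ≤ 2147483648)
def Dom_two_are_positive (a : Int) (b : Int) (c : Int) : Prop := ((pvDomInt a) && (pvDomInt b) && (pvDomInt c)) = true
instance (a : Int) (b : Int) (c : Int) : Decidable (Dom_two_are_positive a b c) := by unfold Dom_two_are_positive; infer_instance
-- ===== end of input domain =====

-- B replaces A's counting loop over a list by one boolean expression enumerating the
-- three mutually exclusive ways exactly two of the three numbers are positive (simpler).

-- ===== PORT A =====
def two_are_positive (a : Int) (b : Int) (c : Int) : Bool :=
  let numeros : List Int := [a, b, c]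
  let dos_true : Int :=
    (PySem.List.pyRange 0 (numeros.length : Int) 1).foldl
      (fun acc i => if PySem.List.pyGetD numeros i 0 > 0 then acc + 1 else acc) 0
  if dos_true = 2 then true else false

-- ===== PORT B =====
def two_are_positive_alt (a : Int) (b : Int) (c : Int) : Bool :=
  (decide (a > 0) && decide (b > 0) && decide (c ≤ 0)) ||
  (decide (a > 0) && decide (c > 0) && decide (b ≤ 0)) ||
  (decide (b > 0) && decide (c > 0) && decide (a ≤ 0))

-- ===== PRECONDITION & SPEC =====
def Spec_two_are_positive (a : Int) (b : Int) (c : Int) (out : Bool) : Prop := out = two_are_positive_alt a b c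
instance (a : Int) (b : Int) (c : Int) (out : Bool) : Decidable (Spec_two_are_positive a b c out) := by unfold Spec_two_are_positive; infer_instance

-- ===== CLAIM (what is proved, stated in full; the proofs are below) =====
def Claim_equal_two_are_positive : Prop := ∀ (a : Int) (b : Int) (c : Int), Dom_two_are_positive a b c → Spec_two_are_positive a b c (two_are_positive a b c)

-- ===== LEMMAS AND PROOFS =====

-- ===== VERDICT (by name: the statement is the Claim_ definition above) =====
theorem two_are_positive_spec : Claim_equal_two_are_positive := by
  intro a b c _
  unfold Spec_two_are_positive two_are_positive two_are_positive_alt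
  simp only [List.length_cons, List.length_nil]
  have hl : (((0 + 1 + 1 + 1 : Nat)) : Int) = 3 := by norm_num
  have h : PySem.List.pyRange 0 (3 : Int) 1 = [0, 1, 2] := by decide
  simp only [hl, h]
  simp only [List.foldl]
  have g0 : PySem.List.pyGetD [a, b, c] (0 : Int) 0 = a := by
    simp [PySem.List.pyGetD, PySem.List.pyGet?, PySem.List.pyIdx?]
  have g1 : PySem.List.pyGetD [a, b, c] (1 : Int) 0 = b := by
    simp [PySem.List.pyGetD, PySem.List.pyGet?, PySem.List.pyIdx?]
  have g2 : PySem.List.pyGetD [a, b, c] (2 : Int) 0 = c := by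
    simp [PySem.List.pyGetD, PySem.List.pyGet?, PySem.List.pyIdx?]
  simp only [g0, g1, g2]
  by_cases ha : a > 0 <;> by_cases hb : b > 0 <;> by_cases hc : c > 0 <;>
    simp [ha, hb, hc] <;> omega
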